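-- pv_equiv track=rewrite | github.com/evgeniy-kulikov/unified-state-exam | 25/task_25_01.py | fn
-- ===== SOURCE A (Python) =====
-- def fn(n):
--     d = set()
--     for i in range(2, int(n**0.5 + 1)):
--         if not n % i:
--             d.add(i)
--             d.add(n // i)
--     ls = [i for i in d if i % 100 == 25 and i != 25]
--     if len(ls): return max(ls)
-- ===== SOURCE B (Python) =====
-- def fn(n):
--     # Largest divisor d of n with 125 <= d < n and d % 100 == 25, else None.
--     # Any such divisor is a multiple of 25, so bail out unless 25 divides n;
--     # then walk the candidates ... , 325, 225, 125 downward from just below n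
--     # and return the first that divides n.
--     if n % 25:
--         return None
--     c = (n - 26) // 100 * 100 + 25
--     while c >= 125:
--         if n % c == 0:
--             return c
--         c -= 100
--     return None
-- ===== Notes on version B (the rewrite author's own statement) =====
-- stated objective: alternative
-- what changed: B enumerates the candidate values ending in 25 directly (descending from just below n, step 100, first divisor wins, with an O(1) bail-out when 25 does not divide n) instead of A's sqrt-bounded divisor harvesting into a set followed by filter and max.
-- outside the precondition, e.g. on fn(-5): A raises TypeError, B returns None
import Mathlib
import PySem

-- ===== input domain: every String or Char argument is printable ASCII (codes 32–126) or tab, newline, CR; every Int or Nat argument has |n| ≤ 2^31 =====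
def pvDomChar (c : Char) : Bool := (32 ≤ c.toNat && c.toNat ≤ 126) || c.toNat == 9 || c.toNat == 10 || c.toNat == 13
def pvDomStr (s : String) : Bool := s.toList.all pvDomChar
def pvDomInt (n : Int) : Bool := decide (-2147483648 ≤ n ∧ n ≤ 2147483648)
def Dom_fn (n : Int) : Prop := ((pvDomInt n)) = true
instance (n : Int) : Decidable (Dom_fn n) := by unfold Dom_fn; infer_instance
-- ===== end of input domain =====

-- B enumerates candidates ending in 25 top-down (step 100, O(1) bail-out when 25 ∤ n) instead of A's sqrt-bounded divisor harvesting; objective: alternative.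


-- ===== PORT A =====
-- d = set(); for i in range(2, int(n**0.5 + 1)): if not n % i: d.add(i); d.add(n // i)
-- int(n**0.5 + 1) is ported as Nat.sqrt n.toNat + 1: exact for every n in Dom with 0 ≤ n
-- (double sqrt is correctly rounded and n ≤ 2^31 < 2^53); for n < 0 Python raises TypeError (outside Pre_).
def fnDivSet (n : Int) : PySem.Set Int :=
  (PySem.List.pyRange 2 ((Nat.sqrt n.toNat : Int) + 1) 1).foldl
    (fun s i => if PySem.Int.mod n i == 0
                then PySem.Set.add (PySem.Set.add s i) (PySem.Int.floordiv n i)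
                else s)
    PySem.Set.empty

def fn (n : Int) : Option Int :=
  let ls : List Int := (fnDivSet n).filter (fun i => PySem.Int.mod i 100 == 25 && !(i == 25))
  if ls.length ≠ 0 then PySem.List.max? ls (fun x => x) else none

-- ===== PORT B =====
-- while c >= 125: if n % c == 0: return c; c -= 100
def fnAltLoop (n c : Int) : Option Int :=
  if h : 125 ≤ c then
    if PySem.Int.mod n c == 0 then some c else fnAltLoop n (c - 100)
  else none
termination_by (c - 24).toNat
decreasing_by omega

def fn_alt (n : Int) : Option Int :=
  if ¬ (PySem.Int.mod n 25 == 0) then none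
  else fnAltLoop n (PySem.Int.floordiv (n - 26) 100 * 100 + 25)

-- ===== PRECONDITION & SPEC =====
-- Pre_ excludes n < 0, where A raises TypeError (int() of the complex number n**0.5).
def Pre_fn (n : Int) : Prop := 0 ≤ n
instance (n : Int) : Decidable (Pre_fn n) := by unfold Pre_fn; infer_instance
def pvWitness_fn : Int := (1250)

def Spec_fn (n : Int) (out : Option Int) : Prop := out = fn_alt n
instance (n : Int) (out : Option Int) : Decidable (Spec_fn n out) := by unfold Spec_fn; infer_instance

-- ===== CLAIM (what is proved, stated in full; the proofs are below) =====
def Claim_equal_fn : Prop := ∀ (n : Int), Dom_fn n → Pre_fn n → Spec_fn n (fn n)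

-- ===== LEMMAS AND PROOFS =====

-- membership in A's divisor set
lemma mem_divfold (n : Int) (l : List Int) (s : PySem.Set Int) (x : Int) :
    x ∈ l.foldl
      (fun s i => if PySem.Int.mod n i == 0
                  then PySem.Set.add (PySem.Set.add s i) (PySem.Int.floordiv n i)
                  else s) s
    ↔ x ∈ s ∨ ∃ i ∈ l, PySem.Int.mod n i = 0 ∧ (x = i ∨ x = PySem.Int.floordiv n i) := by
  induction l generalizing s with
  | nil => simp
  | cons a t ih =>
    rw [List.foldl_cons, ih]
    by_cases h : PySem.Int.mod n a = 0
    · simp only [h, beq_self_eq_true, if_true, PySem.Set.mem_add, List.mem_cons]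
      constructor
      · rintro (((hs | rfl) | rfl) | ⟨i, hi, hm, hx⟩)
        · exact Or.inl hs
        · exact Or.inr ⟨x, Or.inl rfl, h, Or.inl rfl⟩
        · exact Or.inr ⟨a, Or.inl rfl, h, Or.inr rfl⟩
        · exact Or.inr ⟨i, Or.inr hi, hm, hx⟩
      · rintro (hs | ⟨i, (rfl | hi), hm, hx⟩)
        · exact Or.inl (Or.inl (Or.inl hs))
        · rcases hx with rfl | rfl
          · exact Or.inl (Or.inl (Or.inr rfl))
          · exact Or.inl (Or.inr rfl)
        · exact Or.inr ⟨i, hi, hm, hx⟩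
    · have h' : (PySem.Int.mod n a == 0) = false := by simpa using h
      simp only [h', Bool.false_eq_true, if_false]
      constructor
      · rintro (hs | hex)
        · exact Or.inl hs
        · exact Or.inr ⟨hex.choose, List.mem_cons_of_mem _ hex.choose_spec.1, hex.choose_spec.2⟩
      · rintro (hs | ⟨i, hi, hmod, hx⟩)
        · exact Or.inl hs
        · rcases List.mem_cons.mp hi with rfl | hi
          · exact absurd hmod h
          · exact Or.inr ⟨i, hi, hmod, hx⟩

-- the filtered list of A contains exactly the divisors d of n with 125 ≤ d < n, d % 100 = 25
lemma mem_ls (n x : Int) (hn : 0 ≤ n) :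
    x ∈ (fnDivSet n).filter (fun i => PySem.Int.mod i 100 == 25 && !(i == 25))
    ↔ (x % 100 = 25 ∧ 125 ≤ x ∧ x < n ∧ n % x = 0) := by
  have hS1 : (Nat.sqrt n.toNat : Int) * (Nat.sqrt n.toNat : Int) ≤ n := by
    have h := Nat.sqrt_le' n.toNat
    zify at h
    rw [Int.toNat_of_nonneg hn] at h
    nlinarith [h]
  have hS2 : n < ((Nat.sqrt n.toNat : Int) + 1) * ((Nat.sqrt n.toNat : Int) + 1) := by
    have h := Nat.lt_succ_sqrt' n.toNat
    zify at h
    rw [Int.toNat_of_nonneg hn] at h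
    nlinarith [h]
  set S : Int := (Nat.sqrt n.toNat : Int) with hS
  simp only [fnDivSet, List.mem_filter]
  rw [mem_divfold]
  simp only [PySem.List.mem_pyRange_one, PySem.Set.empty, List.not_mem_nil, false_or,
    Bool.and_eq_true, beq_iff_eq, Bool.not_eq_eq_eq_not, Bool.not_true,
    beq_eq_false_iff_ne, ne_eq]
  rw [PySem.Int.mod_eq_emod_of_pos (by norm_num : (0:Int) < 100)]
  constructor
  · rintro ⟨⟨i, ⟨h2i, hiS⟩, hmod, hx⟩, hm25, hne⟩
    have hipos : (0:Int) < i := by omega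
    rw [PySem.Int.mod_eq_emod_of_pos hipos] at hmod
    have hdvd : i ∣ n := Int.dvd_of_emod_eq_zero hmod
    rcases hx with rfl | rfl
    · have h125 : 125 ≤ x := by omega
      refine ⟨hm25, h125, ?_, hmod⟩
      nlinarith
    · rw [PySem.Int.floordiv_eq_ediv_of_pos hipos] at *
      have hni : i * (n / i) = n := Int.mul_ediv_cancel' hdvd
      have hxnn : 0 ≤ n / i := Int.ediv_nonneg hn (le_of_lt hipos)
      have h125 : 125 ≤ n / i := by omega
      have hxd : (n / i) ∣ n := ⟨i, by linarith [mul_comm i (n / i)]⟩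
      refine ⟨hm25, h125, ?_, Int.emod_eq_zero_of_dvd hxd⟩
      nlinarith
  · rintro ⟨hm25, h125, hxn, hmod⟩
    have hxpos : (0:Int) < x := by omega
    have hdvd : x ∣ n := Int.dvd_of_emod_eq_zero hmod
    have hq : x * (n / x) = n := Int.mul_ediv_cancel' hdvd
    set q : Int := n / x with hqdef
    have hqpos : 0 < q := by nlinarith
    have hq2 : 2 ≤ q := by
      rcases lt_or_ge q 2 with hlt | hge
      · have : q = 1 := by omega
        rw [this, mul_one] at hq
        omega
      · exact hge
    refine ⟨?_, hm25, by omega⟩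
    by_cases hxS : x ≤ S
    · exact ⟨x, ⟨by omega, by omega⟩, by rw [PySem.Int.mod_eq_emod_of_pos hxpos]; exact hmod, Or.inl rfl⟩
    · have hxS' : S < x := by omega
      have hqS : q < S + 1 := by nlinarith
      have hqdvd : q ∣ n := ⟨x, by linarith [mul_comm x q]⟩
      refine ⟨q, ⟨by omega, by omega⟩, ?_, Or.inr ?_⟩
      · rw [PySem.Int.mod_eq_emod_of_pos (by omega : (0:Int) < q)]
        exact Int.emod_eq_zero_of_dvd hqdvd
      · rw [PySem.Int.floordiv_eq_ediv_of_pos (by omega : (0:Int) < q)]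
        have h1 : q * (n / q) = n := Int.mul_ediv_cancel' hqdvd
        have h2 : q * x = n := by linarith [mul_comm x q]
        have := mul_left_cancel₀ (by omega : q ≠ 0) (h1.trans h2.symm)
        omega

-- B's loop returns none when nothing in the candidate chain divides n
lemma loop_none (n : Int) : ∀ (k : Nat) (c : Int), (c - 24).toNat = k → c % 100 = 25 →
    (∀ d, 125 ≤ d → d ≤ c → d % 100 = 25 → ¬ (n % d = 0)) → fnAltLoop n c = none := by
  intro k
  induction k using Nat.strong_induction_on with
  | _ k ih =>
    intro c hk hc25 h
    rw [fnAltLoop]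
    by_cases hc : 125 ≤ c
    · rw [dif_pos hc]
      have hnd : ¬ (n % c = 0) := h c hc le_rfl hc25
      have hb : (PySem.Int.mod n c == 0) = false := by
        rw [PySem.Int.mod_eq_emod_of_pos (by omega : (0:Int) < c)]
        simpa using hnd
      rw [hb]
      simp only [Bool.false_eq_true, if_false]
      exact ih ((c - 100) - 24).toNat (by omega) (c - 100) rfl (by omega)
        (fun d hd1 hd2 hd3 => h d hd1 (by omega) hd3)
    · rw [dif_neg hc]

-- B's loop returns the greatest qualifying divisor when there is one
lemma loop_max (n : Int) : ∀ (k : Nat) (c : Int), (c - 24).toNat = k → c % 100 = 25 →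
    ∀ m, 125 ≤ m → m ≤ c → m % 100 = 25 → n % m = 0 →
    (∀ d, 125 ≤ d → d ≤ c → d % 100 = 25 → n % d = 0 → d ≤ m) →
    fnAltLoop n c = some m := by
  intro k
  induction k using Nat.strong_induction_on with
  | _ k ih =>
    intro c hk hc25 m hm1 hm2 hm3 hm4 hmax
    have hc : 125 ≤ c := by omega
    rw [fnAltLoop, dif_pos hc]
    by_cases hdc : n % c = 0
    · have hcm : c ≤ m := hmax c hc le_rfl hc25 hdc
      have : c = m := by omega
      have hb : (PySem.Int.mod n c == 0) = true := by
        rw [PySem.Int.mod_eq_emod_of_pos (by omega : (0:Int) < c)]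
        simpa using hdc
      rw [hb]
      simp [this]
    · have hb : (PySem.Int.mod n c == 0) = false := by
        rw [PySem.Int.mod_eq_emod_of_pos (by omega : (0:Int) < c)]
        simpa using hdc
      rw [hb]
      simp only [Bool.false_eq_true, if_false]
      have hmc : m ≠ c := by rintro rfl; exact hdc hm4
      have hm2' : m ≤ c - 100 := by omega
      exact ih ((c - 100) - 24).toNat (by omega) (c - 100) rfl (by omega)
        m hm1 hm2' hm3 hm4 (fun d hd1 hd2 hd3 hd4 => hmax d hd1 (by omega) hd3 hd4)

-- ===== VERDICT (by name: the statement is the Claim_ definition above) =====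
theorem fn_spec : Claim_equal_fn := by
  intro n _ hpre
  have hn : (0:Int) ≤ n := hpre
  show fn n = fn_alt n
  have hc0 : PySem.Int.floordiv (n - 26) 100 * 100 + 25 = (n - 26) / 100 * 100 + 25 := by
    rw [PySem.Int.floordiv_eq_ediv_of_pos (by norm_num : (0:Int) < 100)]
  have hc25 : ((n - 26) / 100 * 100 + 25) % 100 = 25 := by omega
  have hc0lt : (n - 26) / 100 * 100 + 25 ≤ n - 1 := by omega
  have hdle : ∀ d : Int, d % 100 = 25 → d < n → d ≤ (n - 26) / 100 * 100 + 25 := by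
    intro d hd hdn; omega
  have h25 : PySem.Int.mod n 25 = n % 25 := PySem.Int.mod_eq_emod_of_pos (by norm_num)
  by_cases hnil : (fnDivSet n).filter (fun i => PySem.Int.mod i 100 == 25 && !(i == 25)) = []
  · have hA : fn n = none := by
      simp only [fn]
      rw [hnil]
      simp
    rw [hA]
    by_cases hd25 : n % 25 = 0
    · have hg : (PySem.Int.mod n 25 == 0) = true := by rw [h25]; simpa using hd25
      simp only [fn_alt, hg, not_true, if_false, hc0]
      refine (loop_none n _ _ rfl hc25 ?_).symm
      intro d hd1 hd2 hd3 hd4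
      have hmem : d ∈ (fnDivSet n).filter (fun i => PySem.Int.mod i 100 == 25 && !(i == 25)) :=
        (mem_ls n d hn).mpr ⟨hd3, hd1, by omega, hd4⟩
      rw [hnil] at hmem
      exact List.not_mem_nil hmem
    · have hg : (PySem.Int.mod n 25 == 0) = false := by rw [h25]; simpa using hd25
      rw [fn_alt, if_pos (by simp; exact fun hdvd => hd25 (Int.emod_eq_zero_of_dvd hdvd))]
  · rcases h : PySem.List.max? ((fnDivSet n).filter (fun i => PySem.Int.mod i 100 == 25 && !(i == 25))) (fun x => x) with _ | m
    · exact absurd ((PySem.List.max?_eq_none_iff _ _).mp h) hnil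
    · have hA : fn n = some m := by
        simp only [fn]
        rw [if_pos (by simpa using List.length_pos_iff.mpr hnil), h]
      have hmem := PySem.List.max?_mem h
      have hub := PySem.List.max?_isMax h
      obtain ⟨hm25, hm125, hmn, hmd⟩ := (mem_ls n m hn).mp hmem
      have hmdvd : m ∣ n := Int.dvd_of_emod_eq_zero hmd
      have h25m : (25:Int) ∣ m := by omega
      have hn25 : n % 25 = 0 := Int.emod_eq_zero_of_dvd (h25m.trans hmdvd)
      have hg : (PySem.Int.mod n 25 == 0) = true := by rw [h25]; simpa using hn25
      rw [hA]
      simp only [fn_alt, hg, not_true, if_false, hc0]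
      refine (loop_max n _ _ rfl hc25 m hm125 (hdle m hm25 hmn) hm25 hmd ?_).symm
      intro d hd1 hd2 hd3 hd4
      exact hub d ((mem_ls n d hn).mpr ⟨hd3, hd1, by omega, hd4⟩)
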